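-- pv_equiv track=rewrite | github.com/xyyusr/AutoChecker | experiment/baselines/noCaseLLM/noCaseLLMGenerator.py | class_is_correctly_imported
-- ===== SOURCE A (Python) =====
-- def class_is_correctly_imported(checker: str, ast_classes: list):
--     new_checker = ""
--     content = [line for line in checker.split("\n")]
--     for line in content:
--         if not line.startswith("import net"):
--             if(line.startswith("public class")):
--                 new_checker += "import net.sourceforge.pmd.lang.java.rule.AbstractJavaRulechainRule;" + "\n"
--                 new_checker += "import net.sourceforge.pmd.lang.java.ast. *;" + "\n"
--                 new_checker += "import net.sourceforge.pmd.lang.java.ast.internal. *;" + "\n"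
--                 new_checker += "import net.sourceforge.pmd.lang.java.types. *;" + "\n"
--                 new_checker += "import net.sourceforge.pmd.lang.java.symbols. *;" + "\n"
--                 new_checker += "import net.sourceforge.pmd.lang.ast.NodeStream;" + "\n"
--             new_checker += line + "\n"
--     new_checker = new_checker.strip()
--     return new_checker
-- ===== SOURCE B (Python) =====
-- BLOCK = (
--     "import net.sourceforge.pmd.lang.java.rule.AbstractJavaRulechainRule;\n"
--     "import net.sourceforge.pmd.lang.java.ast. *;\n"
--     "import net.sourceforge.pmd.lang.java.ast.internal. *;\n"
--     "import net.sourceforge.pmd.lang.java.types. *;\n"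
--     "import net.sourceforge.pmd.lang.java.symbols. *;\n"
--     "import net.sourceforge.pmd.lang.ast.NodeStream;\n"
-- )
--
--
-- def class_is_correctly_imported(checker: str, ast_classes: list):
--     # stage 1: drop the "import net" lines
--     body = "\n".join(l for l in checker.split("\n") if not l.startswith("import net"))
--     # stage 2: one global substitution injects the block before every line
--     # starting with "public class" (a leading "\n" marks the first line start)
--     return ("\n" + body).replace("\npublic class", "\n" + BLOCK + "public class").strip()
-- ===== Notes on version B (the rewrite author's own statement) =====
-- stated objective: alternative
-- what changed: A's single loop that conditionally concatenates the import block and each line onto a string accumulator is replaced by two staged passes: first the non-'import net' lines are joined back into one flat string, then ONE global substring substitution on that string (replace of '\npublic class' with the newline-prefixed constant block plus 'public class') injects the imports before every 'public class' line, followed by strip().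
import Mathlib
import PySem

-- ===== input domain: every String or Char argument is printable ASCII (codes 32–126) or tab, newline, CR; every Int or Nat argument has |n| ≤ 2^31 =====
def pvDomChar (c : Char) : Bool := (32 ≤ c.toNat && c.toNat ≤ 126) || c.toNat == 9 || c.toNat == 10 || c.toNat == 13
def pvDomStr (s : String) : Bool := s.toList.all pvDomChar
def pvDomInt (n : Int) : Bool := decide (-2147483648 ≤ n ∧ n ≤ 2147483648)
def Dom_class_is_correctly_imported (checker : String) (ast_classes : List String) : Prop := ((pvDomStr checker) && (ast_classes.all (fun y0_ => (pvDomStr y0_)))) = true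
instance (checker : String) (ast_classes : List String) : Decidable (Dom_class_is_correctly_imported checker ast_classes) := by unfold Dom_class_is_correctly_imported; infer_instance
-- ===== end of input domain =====

set_option maxRecDepth 40000

-- B replaces A's per-line conditional injection loop by two staged passes: join the
-- kept lines into one flat string, then ONE global substring substitution injects
-- the import block before every "public class" line (different decomposition).

-- ===== PORT A =====
-- A accumulates new_checker by += over the lines of checker.split("\n"), skipping
-- "import net" lines and emitting the six import lines before each "public class"
-- line, then strips. Ported on List Char (PySem.Chars is exact there; Lean's own
-- String.append is opaque to the kernel).
def class_is_correctly_imported (checker : String) (ast_classes : List String) : String :=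
  String.ofList (PySem.Chars.strip
    ((PySem.Chars.splitOn checker.toList "\n".toList).foldl (fun acc line =>
      if !(PySem.Chars.startswith line "import net".toList) then
        (if PySem.Chars.startswith line "public class".toList then
          acc ++ "import net.sourceforge.pmd.lang.java.rule.AbstractJavaRulechainRule;".toList ++ "\n".toList
              ++ "import net.sourceforge.pmd.lang.java.ast. *;".toList ++ "\n".toList
              ++ "import net.sourceforge.pmd.lang.java.ast.internal. *;".toList ++ "\n".toList
              ++ "import net.sourceforge.pmd.lang.java.types. *;".toList ++ "\n".toList
              ++ "import net.sourceforge.pmd.lang.java.symbols. *;".toList ++ "\n".toList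
              ++ "import net.sourceforge.pmd.lang.ast.NodeStream;".toList ++ "\n".toList
         else acc) ++ line ++ "\n".toList
      else acc) ([] : List Char)))

-- ===== PORT B =====
-- B's constant BLOCK: the six import lines, each newline-terminated.
def pvBlock : List Char :=
  "import net.sourceforge.pmd.lang.java.rule.AbstractJavaRulechainRule;".toList ++ "\n".toList
    ++ "import net.sourceforge.pmd.lang.java.ast. *;".toList ++ "\n".toList
    ++ "import net.sourceforge.pmd.lang.java.ast.internal. *;".toList ++ "\n".toList
    ++ "import net.sourceforge.pmd.lang.java.types. *;".toList ++ "\n".toList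
    ++ "import net.sourceforge.pmd.lang.java.symbols. *;".toList ++ "\n".toList
    ++ "import net.sourceforge.pmd.lang.ast.NodeStream;".toList ++ "\n".toList

-- B: body = "\n".join(kept lines); then ("\n" + body).replace("\npublic class",
-- "\n" + BLOCK + "public class").strip().
def class_is_correctly_imported_alt (checker : String) (ast_classes : List String) : String :=
  String.ofList (PySem.Chars.strip
    (PySem.Chars.replace
      ('\n' :: PySem.Chars.join "\n".toList
        ((PySem.Chars.splitOn checker.toList "\n".toList).filter
          (fun l => !(PySem.Chars.startswith l "import net".toList))))
      ("\npublic class".toList)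
      ('\n' :: (pvBlock ++ "public class".toList))))

-- ===== PRECONDITION & SPEC =====
def Spec_class_is_correctly_imported (checker : String) (ast_classes : List String) (out : String) : Prop := out = class_is_correctly_imported_alt checker ast_classes
instance (checker : String) (ast_classes : List String) (out : String) : Decidable (Spec_class_is_correctly_imported checker ast_classes out) := by unfold Spec_class_is_correctly_imported; infer_instance

-- ===== CLAIM (what is proved, stated in full; the proofs are below) =====
def Claim_equal_class_is_correctly_imported : Prop := ∀ (checker : String) (ast_classes : List String), Dom_class_is_correctly_imported checker ast_classes → Spec_class_is_correctly_imported checker ast_classes (class_is_correctly_imported checker ast_classes)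

-- ===== LEMMAS AND PROOFS =====

-- A's fold, characterised: for each kept line it appends the optional six-line
-- block and the line, each piece newline-terminated.
theorem pvFoldA (kw pc s1 s2 s3 s4 s5 s6 nl : List Char)
    (content : List (List Char)) (acc : List Char) :
    content.foldl (fun acc line =>
      if !(PySem.Chars.startswith line kw) then
        (if PySem.Chars.startswith line pc then
          acc ++ s1 ++ nl ++ s2 ++ nl ++ s3 ++ nl ++ s4 ++ nl ++ s5 ++ nl ++ s6 ++ nl
         else acc) ++ line ++ nl
      else acc) acc
    = acc ++ ((content.filter (fun l => !(PySem.Chars.startswith l kw))).flatMap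
        (fun l => if PySem.Chars.startswith l pc then [s1, s2, s3, s4, s5, s6] ++ [l] else [l])).flatMap
        (fun p => p ++ nl) := by
  induction content generalizing acc with
  | nil => simp
  | cons line rest ih =>
    rw [List.foldl_cons, ih]
    cases hk : PySem.Chars.startswith line kw with
    | true => simp [hk]
    | false =>
      cases hp : PySem.Chars.startswith line pc with
      | true => simp [hk, hp, List.append_assoc]
      | false => simp [hk, hp, List.append_assoc]

-- splitOn by "\n" yields lines that do not contain '\n'.
theorem pvSplitGoNoNl (l cur : List Char) (acc : List (List Char)) (fuel : ℕ)
    (hf : l.length ≤ fuel) (hc : '\n' ∉ cur) (ha : ∀ p ∈ acc, '\n' ∉ p) :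
    ∀ p ∈ PySem.Chars.splitOn.go ['\n'] fuel l cur acc, '\n' ∉ p := by
  induction l generalizing fuel cur acc with
  | nil =>
    intro p hp
    cases fuel with
    | zero =>
      simp [PySem.Chars.splitOn.go] at hp
      rcases hp with h | h
      · first
        | (subst h; simpa using hc)
        | exact ha _ h
      · first
        | (subst h; simpa using hc)
        | exact ha _ h
    | succ n =>
      simp [PySem.Chars.splitOn.go] at hp
      rcases hp with h | h
      · first
        | (subst h; simpa using hc)
        | exact ha _ h
      · first
        | (subst h; simpa using hc)
        | exact ha _ h
  | cons c t ih =>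
    intro p hp
    cases fuel with
    | zero => simp at hf
    | succ n =>
      by_cases hpre : List.isPrefixOf ['\n'] (c :: t) = true
      · have hc' : c = '\n' := by
          simp [List.isPrefixOf] at hpre
          first
          | exact hpre.symm
          | exact hpre
        rw [show PySem.Chars.splitOn.go ['\n'] (n+1) (c :: t) cur acc
              = PySem.Chars.splitOn.go ['\n'] n (List.drop 1 (c :: t)) [] (cur.reverse :: acc) by
            simp [PySem.Chars.splitOn.go, hpre]] at hp
        refine ih [] (cur.reverse :: acc) n (by simpa using hf) (by simp) ?_ p hp
        intro q hq
        rcases List.mem_cons.mp hq with h | h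
        · subst h; simpa using hc
        · exact ha _ h
      · rw [show PySem.Chars.splitOn.go ['\n'] (n+1) (c :: t) cur acc
              = PySem.Chars.splitOn.go ['\n'] n t (c :: cur) acc by
            simp [PySem.Chars.splitOn.go, hpre]] at hp
        have hcn : c ≠ '\n' := by
          intro h; subst h; simp [List.isPrefixOf] at hpre
        refine ih (c :: cur) acc n (by simpa using hf) ?_ ha p hp
        intro h
        rcases List.mem_cons.mp h with h | h
        · exact hcn h.symm
        · exact hc h

theorem pvSplitNoNl (s : List Char) :
    ∀ p ∈ PySem.Chars.splitOn s "\n".toList, '\n' ∉ p := by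
  have h : "\n".toList = ['\n'] := rfl
  rw [h, PySem.Chars.splitOn]
  exact pvSplitGoNoNl s [] [] (s.length + 1) (by omega) (by simp) (by simp)

-- a pattern with no '\n' that is not a prefix of l cannot become one by appending
-- [] or a '\n'-headed tail.
theorem pvNoExtend (rest : List Char)
    (hr : rest = [] ∨ ∃ t, rest = '\n' :: t) (pw : List Char) :
    ∀ (l : List Char), '\n' ∉ pw → List.isPrefixOf pw l = false →
    List.isPrefixOf pw (l ++ rest) = false := by
  induction pw with
  | nil => intro l hpw h; simp [List.isPrefixOf] at h
  | cons p pw' ih =>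
    intro l hpw h
    cases l with
    | nil =>
      rcases hr with h1 | ⟨t, h1⟩ <;> subst h1
      · simpa using h
      · have hpn : p ≠ '\n' := fun he => hpw (he ▸ List.mem_cons_self ..)
        have hbe : (p == '\n') = false := beq_eq_false_iff_ne.mpr hpn
        simp [List.isPrefixOf, hbe]
    | cons a l' =>
      simp only [List.cons_append, List.isPrefixOf] at h ⊢
      cases hpa : (p == a) with
      | false => simp [hpa]
      | true =>
        simp only [hpa, Bool.true_and] at h ⊢
        exact ih l' (fun hm => hpw (List.mem_cons_of_mem _ hm)) h

-- scanning a '\n'-free segment with the '\n'-headed pattern just copies it.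
theorem pvScan (pw new : List Char) (m : List Char) (hm : '\n' ∉ m) :
    ∀ (rest acc : List Char) (fuel : ℕ),
    PySem.Chars.replace.go ('\n' :: pw) new (m.length + fuel) (m ++ rest) acc
      = PySem.Chars.replace.go ('\n' :: pw) new fuel rest (m.reverse ++ acc) := by
  induction m with
  | nil => intro rest acc fuel; simp
  | cons c t ih =>
    intro rest acc fuel
    have hc : c ≠ '\n' := fun he => hm (he ▸ List.mem_cons_self ..)
    have hbe : ('\n' == c) = false := beq_eq_false_iff_ne.mpr (Ne.symm hc)
    have hpre : List.isPrefixOf ('\n' :: pw) (c :: (t ++ rest)) = false := by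
      simp [List.isPrefixOf, hbe]
    have hlen : (c :: t).length + fuel = (t.length + fuel) + 1 := by simp; omega
    rw [hlen]
    rw [show PySem.Chars.replace.go ('\n' :: pw) new ((t.length + fuel) + 1)
          ((c :: t) ++ rest) acc
        = PySem.Chars.replace.go ('\n' :: pw) new (t.length + fuel) (t ++ rest) (c :: acc) by
        simp [PySem.Chars.replace.go, hpre]]
    rw [ih (fun h => hm (List.mem_cons_of_mem _ h)) rest (c :: acc) fuel]
    simp

-- the main replace characterisation: on a '\n'-prefixed join of '\n'-free lines,
-- replace with pattern '\n'+pw and replacement '\n'+blk+pw expands each line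
-- starting with pw into blk+line.
theorem pvGoMain (pw blk : List Char) (hpw : '\n' ∉ pw)
    (ls : List (List Char)) (hls : ∀ l ∈ ls, '\n' ∉ l) :
    ∀ (acc : List Char) (fuel : ℕ),
    (ls.flatMap (fun l => '\n' :: l)).length ≤ fuel →
    PySem.Chars.replace.go ('\n' :: pw) ('\n' :: (blk ++ pw)) fuel
        (ls.flatMap (fun l => '\n' :: l)) acc
      = acc.reverse ++ ls.flatMap (fun l => '\n' :: (if List.isPrefixOf pw l then blk ++ l else l)) := by
  induction ls with
  | nil =>
    intro acc fuel _
    cases fuel <;> simp [PySem.Chars.replace.go]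
  | cons l ls' ih =>
    intro acc fuel hf
    have hlnl : '\n' ∉ l := hls l (List.mem_cons_self ..)
    have hls' : ∀ x ∈ ls', '\n' ∉ x := fun x hx => hls x (List.mem_cons_of_mem _ hx)
    simp only [List.flatMap_cons, List.cons_append, List.length_cons, List.length_append] at hf ⊢
    cases fuel with
    | zero => omega
    | succ n =>
      by_cases hp : List.isPrefixOf pw l = true
      · -- matching line: consume the pattern, emit the replacement
        obtain ⟨t, ht'⟩ := List.isPrefixOf_iff_prefix.mp hp
        have ht : l = pw ++ t := ht'.symm
        have htnl : '\n' ∉ t := fun h => hlnl (ht ▸ List.mem_append_right _ h)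
        have hpre : List.isPrefixOf ('\n' :: pw) ('\n' :: (l ++ ls'.flatMap (fun l => '\n' :: l))) = true := by
          simp only [List.isPrefixOf, BEq.rfl, Bool.true_and]
          exact List.isPrefixOf_iff_prefix.mpr
            (List.IsPrefix.trans ⟨t, ht'⟩ (List.prefix_append l _))
        rw [show PySem.Chars.replace.go ('\n' :: pw) ('\n' :: (blk ++ pw)) (n+1)
              ('\n' :: (l ++ ls'.flatMap (fun l => '\n' :: l))) acc
            = PySem.Chars.replace.go ('\n' :: pw) ('\n' :: (blk ++ pw)) n
              (List.drop ('\n' :: pw).length ('\n' :: (l ++ ls'.flatMap (fun l => '\n' :: l))))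
              (('\n' :: (blk ++ pw)).reverse ++ acc) by
            simp [PySem.Chars.replace.go, hpre]]
        have hdrop : List.drop ('\n' :: pw).length ('\n' :: (l ++ ls'.flatMap (fun l => '\n' :: l)))
            = t ++ ls'.flatMap (fun l => '\n' :: l) := by
          rw [ht, show ('\n' :: pw).length = pw.length + 1 from by simp,
              List.drop_succ_cons, List.append_assoc, List.drop_left]
        rw [hdrop]
        have hlen : l.length = pw.length + t.length := by simp [ht]
        have hn : t.length + (n - t.length) = n := by omega
        rw [← hn, pvScan pw _ t htnl]
        rw [ih hls' _ _ (by omega)]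
        simp [hp, ht]
      · -- non-matching line: copy the '\n' and the line
        have hp' : List.isPrefixOf pw l = false := Bool.eq_false_iff.mpr hp
        have hrest : ls'.flatMap (fun l => '\n' :: l) = []
            ∨ ∃ t, ls'.flatMap (fun l => '\n' :: l) = '\n' :: t := by
          cases ls' with
          | nil => left; rfl
          | cons x xs => right; exact ⟨x ++ xs.flatMap (fun l => '\n' :: l), by simp⟩
        have hpre : List.isPrefixOf ('\n' :: pw) ('\n' :: (l ++ ls'.flatMap (fun l => '\n' :: l))) = false := by
          simp only [List.isPrefixOf, BEq.rfl, Bool.true_and]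
          exact pvNoExtend _ hrest pw l hpw hp'
        rw [show PySem.Chars.replace.go ('\n' :: pw) ('\n' :: (blk ++ pw)) (n+1)
              ('\n' :: (l ++ ls'.flatMap (fun l => '\n' :: l))) acc
            = PySem.Chars.replace.go ('\n' :: pw) ('\n' :: (blk ++ pw)) n
              (l ++ ls'.flatMap (fun l => '\n' :: l)) ('\n' :: acc) by
            simp [PySem.Chars.replace.go, hpre]]
        have hn : l.length + (n - l.length) = n := by omega
        rw [← hn, pvScan pw _ l hlnl]
        rw [ih hls' _ _ (by omega)]
        simp [hp']

-- "\n".join of a nonempty list, '\n'-prefixed, is the flatMap of '\n'-prefixed lines.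
theorem pvJoinFlat (x : List Char) (xs : List (List Char)) :
    '\n' :: PySem.Chars.join ['\n'] (x :: xs) = (x :: xs).flatMap (fun l => '\n' :: l) := by
  induction xs generalizing x with
  | nil => simp [PySem.Chars.join, List.intercalate]
  | cons y ys ih =>
    have h2 := ih y
    simp only [PySem.Chars.join, List.intercalate, List.intersperse, List.flatten] at h2 ⊢
    cases ys <;> simp_all

theorem pvStripConsNl (l : List Char) :
    PySem.Chars.strip ('\n' :: l) = PySem.Chars.strip l := by
  have h1 : PySem.Chars.isspace '\n' = true := by decide
  simp [PySem.Chars.strip, PySem.Chars.lstrip, h1]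

theorem pvRstripNl (l : List Char) :
    PySem.Chars.rstrip (l ++ ['\n']) = PySem.Chars.rstrip l := by
  have h1 : PySem.Chars.isspace '\n' = true := by decide
  simp [PySem.Chars.rstrip, h1]

theorem pvStripNl (l : List Char) :
    PySem.Chars.strip (l ++ ['\n']) = PySem.Chars.strip l := by
  have h1 : PySem.Chars.isspace '\n' = true := by decide
  simp only [PySem.Chars.strip, PySem.Chars.lstrip, List.dropWhile_append]
  by_cases h : (List.dropWhile PySem.Chars.isspace l).isEmpty = true
  · rw [List.isEmpty_iff] at h
    simp [h, h1]
  · simp [h, pvRstripNl]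

-- flatMap with trailing newlines = join + trailing newline.
theorem pvFlatMapNl (ps : List (List Char)) :
    ps.flatMap (fun p => p ++ ['\n'])
      = (PySem.Chars.join ['\n'] ps) ++ (if ps.isEmpty then [] else ['\n']) := by
  induction ps with
  | nil => simp [PySem.Chars.join, List.intercalate]
  | cons p rest ih =>
    cases rest with
    | nil => simp [PySem.Chars.join, List.intercalate, List.intersperse]
    | cons q qs =>
      simp only [List.flatMap_cons, ih, PySem.Chars.join, List.intercalate, List.intersperse] at *
      simp_all

-- newline-prefixed pieces and newline-terminated pieces agree after strip.
theorem pvStripFlatEq (ps : List (List Char)) :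
    PySem.Chars.strip (ps.flatMap (fun p => '\n' :: p))
      = PySem.Chars.strip (ps.flatMap (fun p => p ++ ['\n'])) := by
  cases ps with
  | nil => rfl
  | cons x xs =>
    rw [← pvJoinFlat x xs, pvFlatMapNl, pvStripConsNl]
    have hne : ((x :: xs).isEmpty = true) = False := by simp
    rw [if_neg (by simp)]
    rw [pvStripNl]

-- ===== VERDICT (by name: the statement is the Claim_ definition above) =====
theorem class_is_correctly_imported_spec : Claim_equal_class_is_correctly_imported := by
  intro checker ast_classes _
  show _ = _
  unfold class_is_correctly_imported class_is_correctly_imported_alt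
  rw [pvFoldA, List.nil_append]
  set kept := (PySem.Chars.splitOn checker.toList "\n".toList).filter
      (fun l => !(PySem.Chars.startswith l "import net".toList)) with hkept
  have hnl : ∀ l ∈ kept, '\n' ∉ l := fun l hl =>
    pvSplitNoNl checker.toList l (List.mem_of_mem_filter hl)
  cases hk : kept with
  | nil => rfl
  | cons x xs =>
    have hnl' : ∀ l ∈ x :: xs, '\n' ∉ l := hk ▸ hnl
    have hj : ('\n' :: PySem.Chars.join "\n".toList (x :: xs))
        = (x :: xs).flatMap (fun l => '\n' :: l) := pvJoinFlat x xs
    rw [hj]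
    have hrepl : PySem.Chars.replace ((x :: xs).flatMap (fun l => '\n' :: l))
          ("\npublic class".toList) ('\n' :: (pvBlock ++ "public class".toList))
        = PySem.Chars.replace.go ('\n' :: "public class".toList)
            ('\n' :: (pvBlock ++ "public class".toList))
            (((x :: xs).flatMap (fun l => '\n' :: l)).length)
            ((x :: xs).flatMap (fun l => '\n' :: l)) [] := by
      rw [PySem.Chars.replace]
      rfl
    rw [hrepl]
    rw [pvGoMain "public class".toList pvBlock (by decide)
        (x :: xs) hnl' [] _ le_rfl]
    rw [List.reverse_nil, List.nil_append]
    -- B's expansion equals A's pieces, newline-prefixed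
    have hexp : ∀ (ls : List (List Char)),
        ls.flatMap (fun l => '\n' :: (if List.isPrefixOf "public class".toList l then pvBlock ++ l else l))
          = (ls.flatMap (fun l => if PySem.Chars.startswith l "public class".toList then
                ["import net.sourceforge.pmd.lang.java.rule.AbstractJavaRulechainRule;".toList,
                 "import net.sourceforge.pmd.lang.java.ast. *;".toList,
                 "import net.sourceforge.pmd.lang.java.ast.internal. *;".toList,
                 "import net.sourceforge.pmd.lang.java.types. *;".toList,
                 "import net.sourceforge.pmd.lang.java.symbols. *;".toList,
                 "import net.sourceforge.pmd.lang.ast.NodeStream;".toList] ++ [l]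
              else [l])).flatMap (fun p => '\n' :: p) := by
      intro ls
      induction ls with
      | nil => rfl
      | cons l t iht =>
        rw [List.flatMap_cons, List.flatMap_cons, List.flatMap_append, iht]
        congr 1
        cases hstart : List.isPrefixOf "public class".toList l with
        | true =>
          have hpf : (['p','u','b','l','i','c',' ','c','l','a','s','s'] : List Char) <+: l :=
            (show "public class".toList = (['p','u','b','l','i','c',' ','c','l','a','s','s'] : List Char) from rfl) ▸
              List.isPrefixOf_iff_prefix.mp hstart
          simp [List.flatMap_cons, List.flatMap_append, List.flatMap_nil,
            PySem.Chars.startswith, hstart, hpf, pvBlock,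
            show "\n".toList = ['\n'] from rfl,
            List.append_nil, List.nil_append, List.cons_append,
            List.singleton_append, List.append_assoc]
        | false =>
          have hnp : ¬ ((['p','u','b','l','i','c',' ','c','l','a','s','s'] : List Char) <+: l) := fun hpf => by
            rw [List.isPrefixOf_iff_prefix.mpr
              ((show "public class".toList = (['p','u','b','l','i','c',' ','c','l','a','s','s'] : List Char) from rfl) ▸ hpf)] at hstart
            exact Bool.true_eq_false.mp hstart
          simp [List.flatMap_cons, List.flatMap_append, List.flatMap_nil,
            PySem.Chars.startswith, hstart, hnp,
            List.append_nil, List.nil_append, List.cons_append,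
            List.singleton_append, List.append_assoc]
    rw [hexp, pvStripFlatEq]
    rfl
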